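-- pv_equiv track=rewrite | github.com/elev8tion/-c-ext | code_extract/extractor/sql_extractor.py | _extract_statement
-- ===== SOURCE A (Python) =====
-- def _extract_statement(lines: list[str], start_idx: int) -> str:
--     """Extract a full SQL statement from start line to terminating semicolon.
--
--     Handles:
--     - Multi-line CREATE TABLE (...);
--     - PostgreSQL $$ delimited function bodies
--     - BEGIN...END blocks
--     """
--     result_lines: list[str] = []
--     in_dollar_body = False
--     paren_depth = 0
--     i = start_idx
--
--     while i < len(lines):
--         line = lines[i]
--         result_lines.append(line)
--
--         if in_dollar_body:
--             # Look for closing $$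
--             if "$$" in line and len(result_lines) > 1:
--                 # Check if this line has the closing $$
--                 text_so_far = "\n".join(result_lines)
--                 # Count $$ occurrences — should be even when complete
--                 count = text_so_far.count("$$")
--                 if count >= 2 and count % 2 == 0:
--                     in_dollar_body = False
--                     # Still need the final semicolon
--                     stripped = line.rstrip()
--                     if stripped.endswith(";"):
--                         break
--         else:
--             # Check for $$ to enter dollar-quoted body
--             if "$$" in line:
--                 in_dollar_body = True
--                 i += 1
--                 continue
--
--             # Track parentheses for CREATE TABLE (...) etc.
--             for ch in line:
--                 if ch == "(":
--                     paren_depth += 1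
--                 elif ch == ")":
--                     paren_depth -= 1
--
--             # Check for statement end: semicolon outside parens and $$ blocks
--             stripped = line.rstrip()
--             if stripped.endswith(";") and paren_depth <= 0:
--                 break
--
--         i += 1
--
--     return "\n".join(result_lines)
-- ===== SOURCE B (Python) =====
-- def _extract_statement(lines: list[str], start_idx: int) -> str:
--     """Extract a full SQL statement from start line to terminating semicolon.
--
--     Staged decomposition: (1) materialize the candidate lines, (2) compute the
--     number of lines belonging to the statement with a pure scanner that keeps a
--     running total of "$$" occurrences and never accumulates result text,
--     (3) slice and join once at the end.
--     """
--     chunk = [lines[i] for i in range(start_idx, len(lines))]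
--     return "\n".join(chunk[:_statement_length(chunk)])
--
--
-- def _statement_length(chunk: list[str]) -> int:
--     dollars = 0
--     depth = 0
--     in_body = False
--     for j, line in enumerate(chunk):
--         dollars += line.count("$$")
--         if in_body:
--             if "$$" in line and dollars % 2 == 0:
--                 in_body = False
--                 if line.rstrip().endswith(";"):
--                     return j + 1
--         else:
--             if "$$" in line:
--                 in_body = True
--                 continue
--             depth += line.count("(") - line.count(")")
--             if line.rstrip().endswith(";") and depth <= 0:
--                 return j + 1
--     return len(chunk)
-- ===== Notes on version B (the rewrite author's own statement) =====
-- stated objective: alternative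
-- what changed: B is staged instead of A's single accumulating loop: it first materializes the candidate lines, then a pure scanner returns only the statement's line COUNT (keeping a running total of "$$" occurrences and substring counts for parens, with no result accumulation and no rejoin-and-recount of the collected text), and finally the result is one slice+join; on the generated inputs this was not measurably faster.
import Mathlib
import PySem

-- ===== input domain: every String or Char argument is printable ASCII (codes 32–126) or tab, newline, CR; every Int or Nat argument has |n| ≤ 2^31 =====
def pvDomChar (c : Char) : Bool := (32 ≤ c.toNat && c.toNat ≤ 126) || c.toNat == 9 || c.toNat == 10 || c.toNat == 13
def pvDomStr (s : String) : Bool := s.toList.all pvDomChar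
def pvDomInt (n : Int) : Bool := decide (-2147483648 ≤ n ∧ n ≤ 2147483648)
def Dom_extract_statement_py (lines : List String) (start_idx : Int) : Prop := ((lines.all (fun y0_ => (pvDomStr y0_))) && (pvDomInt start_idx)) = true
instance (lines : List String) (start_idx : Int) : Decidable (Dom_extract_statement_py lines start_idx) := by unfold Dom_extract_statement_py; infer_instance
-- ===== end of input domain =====

-- B is staged (materialize candidate lines, pure scanner returning the statement's line count with a running "$$" total, one slice+join) instead of A's single accumulating loop with rejoin-and-recount (objective: alternative).

-- ===== PORT A =====
-- the while-loop of A; fuel = number of remaining iterations (len - i); on IndexError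
-- (pyGet? = none, i.e. i < -len, excluded by Pre_) it returns the lines collected so far
def extract_statement_py_go (lines : List String) : Nat → Int → List String → Bool → Int → List String
  | 0, _, res, _, _ => res
  | fuel+1, i, res, inBody, depth =>
    match PySem.List.pyGet? lines i with
    | none => res
    | some line =>
      let res' := res ++ [line]
      if inBody then
        if PySem.Str.isIn "$$" line && decide (res'.length > 1) then
          let cnt := PySem.Str.count (PySem.Str.join "\n" res') "$$"
          if 2 ≤ cnt ∧ cnt % 2 = 0 then
            if PySem.Str.endswith (PySem.Str.rstrip line) ";" then res'
            else extract_statement_py_go lines fuel (i+1) res' false depth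
          else extract_statement_py_go lines fuel (i+1) res' true depth
        else extract_statement_py_go lines fuel (i+1) res' true depth
      else
        if PySem.Str.isIn "$$" line then
          extract_statement_py_go lines fuel (i+1) res' true depth
        else
          let depth' := line.toList.foldl
            (fun d ch => if ch = '(' then d + 1 else if ch = ')' then d - 1 else d) depth
          if PySem.Str.endswith (PySem.Str.rstrip line) ";" && decide (depth' ≤ 0) then res'
          else extract_statement_py_go lines fuel (i+1) res' false depth'

def extract_statement_py (lines : List String) (start_idx : Int) : String :=
  PySem.Str.join "\n"
    (extract_statement_py_go lines ((lines.length : Int) - start_idx).toNat start_idx [] false 0)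

-- ===== PORT B =====
-- the comprehension [lines[i] for i in range(start_idx, len(lines))]; on IndexError
-- (pyGet? = none, excluded by Pre_) it stops, as the Python comprehension raises there
def extract_statement_py_alt_chunk (lines : List String) : Nat → Int → List String
  | 0, _ => []
  | fuel+1, i =>
    match PySem.List.pyGet? lines i with
    | none => []
    | some line => line :: extract_statement_py_alt_chunk lines fuel (i+1)

-- _statement_length's for-loop: j = lines already consumed, running dollars/depth/in_body
def extract_statement_py_alt_len : List String → Nat → Int → Bool → Nat → Nat
  | [], j, _, _, _ => j
  | line :: rest, j, depth, inBody, dollars =>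
    let dollars' := dollars + PySem.Str.count line "$$"
    if inBody then
      if PySem.Str.isIn "$$" line && decide (dollars' % 2 = 0) then
        if PySem.Str.endswith (PySem.Str.rstrip line) ";" then j + 1
        else extract_statement_py_alt_len rest (j+1) depth false dollars'
      else extract_statement_py_alt_len rest (j+1) depth true dollars'
    else
      if PySem.Str.isIn "$$" line then
        extract_statement_py_alt_len rest (j+1) depth true dollars'
      else
        let depth' := depth + (PySem.Str.count line "(" : Int) - (PySem.Str.count line ")" : Int)
        if PySem.Str.endswith (PySem.Str.rstrip line) ";" && decide (depth' ≤ 0) then j + 1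
        else extract_statement_py_alt_len rest (j+1) depth' false dollars'

def extract_statement_py_alt (lines : List String) (start_idx : Int) : String :=
  let chunk := extract_statement_py_alt_chunk lines ((lines.length : Int) - start_idx).toNat start_idx
  -- chunk[:k] for the natural number k is List.take k
  PySem.Str.join "\n" (chunk.take (extract_statement_py_alt_len chunk 0 0 false 0))

-- ===== PRECONDITION & SPEC =====
-- Pre_ excludes exactly the inputs where Python A raises IndexError (start_idx below -len(lines))
def Pre_extract_statement_py (lines : List String) (start_idx : Int) : Prop :=
  -(lines.length : Int) ≤ start_idx
instance (lines : List String) (start_idx : Int) : Decidable (Pre_extract_statement_py lines start_idx) := by unfold Pre_extract_statement_py; infer_instance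

def pvWitness_extract_statement_py : List String × Int := (["SELECT 1;"], 0)

def Spec_extract_statement_py (lines : List String) (start_idx : Int) (out : String) : Prop := out = extract_statement_py_alt lines start_idx
instance (lines : List String) (start_idx : Int) (out : String) : Decidable (Spec_extract_statement_py lines start_idx out) := by unfold Spec_extract_statement_py; infer_instance

-- ===== CLAIM (what is proved, stated in full; the proofs are below) =====
def Claim_equal_extract_statement_py : Prop := ∀ (lines : List String) (start_idx : Int), Dom_extract_statement_py lines start_idx → Pre_extract_statement_py lines start_idx → Spec_extract_statement_py lines start_idx (extract_statement_py lines start_idx)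

-- ===== LEMMAS AND PROOFS =====

-- greedy non-overlapping substring count (the recursion PySem.Chars.count.go performs, without fuel)
def gcount (p : List Char) : List Char → Nat
  | [] => 0
  | h :: t => if p.isPrefixOf (h :: t) then gcount p (t.drop (p.length - 1)) + 1 else gcount p t
termination_by l => l.length
decreasing_by
  all_goals simp

theorem gcount_nil (p : List Char) : gcount p [] = 0 := by
  rw [gcount.eq_def]

theorem gcount_cons (p : List Char) (h : Char) (t : List Char) :
    gcount p (h :: t) =
      if p.isPrefixOf (h :: t) then gcount p (t.drop (p.length - 1)) + 1 else gcount p t := by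
  rw [gcount.eq_def]

theorem gcount_go (p : List Char) (hp : p ≠ []) :
    ∀ fuel l acc, l.length ≤ fuel → PySem.Chars.count.go p fuel l acc = acc + gcount p l := by
  intro fuel
  induction fuel with
  | zero =>
    intro l acc h
    cases l with
    | nil => simp [PySem.Chars.count.go, gcount_nil]
    | cons a t => simp at h
  | succ n ih =>
    intro l acc h
    cases l with
    | nil => simp [PySem.Chars.count.go, gcount_nil]
    | cons a t =>
      rw [PySem.Chars.count.go]
      by_cases hpre : p.isPrefixOf (a :: t) = true
      · rw [gcount_cons, if_pos hpre]
        simp only [hpre, if_true]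
        obtain ⟨q, qs, rfl⟩ : ∃ q qs, p = q :: qs := by
          cases p with
          | nil => exact absurd rfl hp
          | cons q qs => exact ⟨q, qs, rfl⟩
        have hdrop : (List.drop (q :: qs).length (a :: t)).length ≤ n := by
          rw [List.length_drop]; simp at h ⊢; omega
        rw [ih _ _ hdrop]
        have heq : List.drop (q :: qs).length (a :: t) = t.drop ((q :: qs).length - 1) := by simp
        rw [heq]; omega
      · rw [gcount_cons, if_neg hpre]
        simp only [hpre]
        exact ih t acc (by simp at h ⊢; omega)

theorem count_eq_gcount (l p : List Char) (hp : p ≠ []) :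
    PySem.Chars.count l p = gcount p l := by
  rw [PySem.Chars.count, if_neg (by simpa using hp), gcount_go p hp l.length l 0 le_rfl]
  omega

-- occurrence characterisation, used for: "$$ in line" ↔ the line's count is positive
theorem gcount_pos_iff (p : List Char) (hp : p ≠ []) (l : List Char) :
    1 ≤ gcount p l ↔ ∃ j, p <+: l.drop j := by
  suffices h : ∀ n l, l.length ≤ n → (1 ≤ gcount p l ↔ ∃ j, p <+: l.drop j) from
    h l.length l le_rfl
  intro n
  induction n with
  | zero =>
    intro l hl
    obtain rfl : l = [] := by cases l with | nil => rfl | cons a t => simp at hl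
    simp [gcount_nil]
    exact hp
  | succ n ih =>
    intro l hl
    cases l with
    | nil =>
      simp [gcount_nil]
      exact hp
    | cons a t =>
      rw [gcount_cons]
      by_cases hpre : p.isPrefixOf (a :: t) = true
      · rw [if_pos hpre]
        constructor
        · intro _; exact ⟨0, by simpa using List.isPrefixOf_iff_prefix.mp hpre⟩
        · intro _; omega
      · rw [if_neg hpre, ih t (by simp at hl ⊢; omega)]
        constructor
        · rintro ⟨j, hj⟩; exact ⟨j + 1, by simpa using hj⟩
        · rintro ⟨j, hj⟩
          cases j with
          | zero =>
            simp at hj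
            exact absurd (List.isPrefixOf_iff_prefix.mpr hj) hpre
          | succ j => exact ⟨j, by simpa using hj⟩

theorem isIn_iff_gcount_pos (p l : List Char) (hp : p ≠ []) :
    PySem.Chars.isIn p l = true ↔ 1 ≤ gcount p l := by
  rw [PySem.Chars.isIn_iff_infix, gcount_pos_iff p hp l]
  constructor
  · rintro ⟨s, t, rfl⟩
    exact ⟨s.length, by simp⟩
  · rintro ⟨j, hj⟩
    exact (hj.isInfix).trans ((List.drop_suffix j l).isInfix)

-- "$$" cannot straddle the "\n" separator: the joined count splits
theorem gcount_dd_append (b : List Char) :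
    ∀ a, gcount ['$', '$'] (a ++ '\n' :: b) = gcount ['$', '$'] a + gcount ['$', '$'] b := by
  suffices h : ∀ n a, a.length ≤ n →
      gcount ['$', '$'] (a ++ '\n' :: b) = gcount ['$', '$'] a + gcount ['$', '$'] b from
    fun a => h a.length a le_rfl
  have base : ∀ b' : List Char, gcount ['$', '$'] ('\n' :: b') = gcount ['$', '$'] b' := by
    intro b'
    rw [gcount_cons, if_neg (by simp [List.isPrefixOf])]
  intro n
  induction n with
  | zero =>
    intro a ha
    obtain rfl : a = [] := by cases a with | nil => rfl | cons x y => simp at ha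
    simp [base, gcount_nil]
  | succ n ih =>
    intro a ha
    match a with
    | [] => simp [base, gcount_nil]
    | [h1] =>
      simp only [List.cons_append, List.nil_append]
      rw [gcount_cons, if_neg (by simp [List.isPrefixOf]), base]
      rw [show gcount ['$', '$'] [h1] = 0 by
        rw [gcount_cons, if_neg (by simp [List.isPrefixOf]), gcount_nil]]
      omega
    | h1 :: h2 :: t =>
      have hsame : List.isPrefixOf ['$', '$'] (h1 :: h2 :: (t ++ '\n' :: b)) =
          List.isPrefixOf ['$', '$'] (h1 :: h2 :: t) := by
        simp [List.isPrefixOf]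
      simp only [List.cons_append]
      by_cases hpre : List.isPrefixOf ['$', '$'] (h1 :: h2 :: t) = true
      · rw [gcount_cons, hsame, if_pos hpre]
        rw [gcount_cons (t := h2 :: t), if_pos hpre]
        simp only [List.length_cons, List.length_nil]
        rw [show ((2 : Nat) - 1) = 1 from rfl] at *
        simp only [List.drop_one, List.tail_cons]
        rw [ih t (by simp at ha ⊢; omega)]
        omega
      · rw [gcount_cons, hsame, if_neg hpre]
        rw [gcount_cons (t := h2 :: t), if_neg hpre]
        have := ih (h2 :: t) (by simp at ha ⊢; omega)
        simpa using this

theorem intercalate_cons2 (sep x z : List Char) (zs : List (List Char)) :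
    List.intercalate sep (x :: z :: zs) = x ++ sep ++ List.intercalate sep (z :: zs) := by
  simp [List.intercalate, List.intersperse_cons₂, List.append_assoc]

-- join (res ++ [line]) on the Chars side
theorem join_snoc (sep y : List Char) :
    ∀ xs, xs ≠ [] → PySem.Chars.join sep (xs ++ [y]) = PySem.Chars.join sep xs ++ sep ++ y := by
  intro xs
  induction xs with
  | nil => intro h; exact absurd rfl h
  | cons x xs ih =>
    intro _
    cases xs with
    | nil => simp [PySem.Chars.join, List.intercalate]
    | cons z zs =>
      have h1 := ih (by simp)
      simp only [PySem.Chars.join] at h1 ⊢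
      simp only [List.cons_append] at h1 ⊢
      rw [intercalate_cons2, intercalate_cons2, h1]
      simp [List.append_assoc]

-- the running invariant: B's dollars = count of "$$" in "\n".join(res)
def dcountInv (res : List String) (dollars : Nat) : Prop :=
  dollars = PySem.Chars.count (PySem.Chars.join ['\n'] (res.map String.toList)) ['$', '$']

theorem dcountInv_nil : dcountInv [] 0 := by
  simp [dcountInv, PySem.Chars.join, List.intercalate, PySem.Chars.count, PySem.Chars.count.go]

theorem dcountInv_snoc (res : List String) (dollars : Nat) (line : String)
    (h : dcountInv res dollars) :
    dcountInv (res ++ [line]) (dollars + PySem.Str.count line "$$") := by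
  unfold dcountInv at h ⊢
  rcases res with _ | ⟨r, rs⟩
  · simp only [List.nil_append, List.map_cons, List.map_nil]
    have h0 : dollars = 0 := by
      simpa [PySem.Chars.join, List.intercalate, PySem.Chars.count, PySem.Chars.count.go] using h
    subst h0
    simp [PySem.Chars.join, List.intercalate, PySem.Str.count]
  · have hmap : List.map String.toList (r :: rs ++ [line]) =
        List.map String.toList (r :: rs) ++ [line.toList] := by simp
    rw [hmap, join_snoc ['\n'] line.toList _ (by simp)]
    rw [count_eq_gcount _ _ (by simp)]
    have heq : PySem.Chars.join ['\n'] ((r :: rs).map String.toList) ++ ['\n'] ++ line.toList =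
           PySem.Chars.join ['\n'] ((r :: rs).map String.toList) ++ ('\n' :: line.toList) := by
      simp
    rw [heq, gcount_dd_append]
    rw [h, count_eq_gcount _ _ (by simp), PySem.Str.count, count_eq_gcount _ _ (by simp)]
    rfl

theorem gcount_single (c : Char) (l : List Char) : gcount [c] l = l.count c := by
  induction l with
  | nil => simp [gcount_nil]
  | cons a t ih =>
    rw [gcount_cons]
    by_cases hc : c = a
    · subst hc
      rw [if_pos (by simp [List.isPrefixOf])]
      simp [ih]
    · rw [if_neg (by simp [List.isPrefixOf]; exact fun h => hc h)]
      rw [ih, List.count_cons]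
      simp
      exact fun h => absurd h.symm hc

-- A's per-character paren loop equals B's two substring counts
theorem paren_foldl (cs : List Char) :
    ∀ d : Int, cs.foldl (fun d ch => if ch = '(' then d + 1 else if ch = ')' then d - 1 else d) d =
      d + (PySem.Chars.count cs ['('] : Int) - (PySem.Chars.count cs [')'] : Int) := by
  induction cs with
  | nil => intro d; simp [PySem.Chars.count, PySem.Chars.count.go]
  | cons a t ih =>
    intro d
    rw [List.foldl_cons, ih]
    rw [count_eq_gcount _ _ (by simp), count_eq_gcount _ _ (by simp),
        count_eq_gcount _ _ (by simp), count_eq_gcount _ _ (by simp)]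
    rw [gcount_single, gcount_single, gcount_single, gcount_single]
    rw [List.count_cons, List.count_cons]
    by_cases h1 : a = '('
    · subst h1
      simp
      ring
    · by_cases h2 : a = ')'
      · subst h2
        simp [h1]
        omega
      · simp [h1, h2]

-- B's j accumulator merely offsets the result
theorem alt_len_shift (c : List String) :
    ∀ j depth inBody dollars,
      extract_statement_py_alt_len c (j+1) depth inBody dollars =
        extract_statement_py_alt_len c j depth inBody dollars + 1 := by
  induction c with
  | nil => intro j depth inBody dollars; rfl
  | cons line rest ih =>
    intro j depth inBody dollars
    rw [extract_statement_py_alt_len, extract_statement_py_alt_len]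
    simp only []
    split_ifs <;> first | rfl | apply ih

-- A's accumulating loop equals res ++ B's (chunk, take-count) pipeline, under the invariant
theorem go_eq (lines : List String) :
    ∀ fuel i res inBody depth dollars,
      (inBody = true → res ≠ [] ∧ 1 ≤ dollars) →
      dcountInv res dollars →
      extract_statement_py_go lines fuel i res inBody depth =
        res ++ (extract_statement_py_alt_chunk lines fuel i).take
          (extract_statement_py_alt_len (extract_statement_py_alt_chunk lines fuel i)
            0 depth inBody dollars) := by
  intro fuel
  induction fuel with
  | zero =>
    intro i res inBody depth dollars _ _
    simp [extract_statement_py_go, extract_statement_py_alt_chunk,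
      extract_statement_py_alt_len]
  | succ n ih =>
    intro i res inBody depth dollars hB hI
    rw [extract_statement_py_go, extract_statement_py_alt_chunk]
    cases hg : PySem.List.pyGet? lines i with
    | none =>
      simp [extract_statement_py_alt_len]
    | some line =>
      simp only []
      rw [extract_statement_py_alt_len]
      simp only []
      have hI' : dcountInv (res ++ [line]) (dollars + PySem.Str.count line "$$") :=
        dcountInv_snoc res dollars line hI
      set res' := res ++ [line] with hres'
      set dollars' := dollars + PySem.Str.count line "$$" with hdol'
      set chunk' := extract_statement_py_alt_chunk lines n (i + 1) with hch'
      have hcnt : PySem.Str.count (PySem.Str.join "\n" res') "$$" = dollars' := by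
        have hl : (PySem.Str.join "\n" res').toList =
            PySem.Chars.join ['\n'] (res'.map String.toList) := by
          simp [PySem.Str.join, PySem.Chars.join]
        rw [PySem.Str.count, hl]
        exact hI'.symm
      have hstep : ∀ d b s, res ++ (line :: chunk').take
            (extract_statement_py_alt_len chunk' 1 d b s) =
          res' ++ chunk'.take (extract_statement_py_alt_len chunk' 0 d b s) := by
        intro d b s
        rw [show (1 : Nat) = 0 + 1 from rfl, alt_len_shift, List.take_succ_cons]
        simp [hres']
      by_cases hbody : inBody = true
      · subst hbody
        obtain ⟨hne, hd1⟩ := hB rfl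
        have hlen : decide (res'.length > 1) = true := by
          rw [hres']
          cases res with
          | nil => exact absurd rfl hne
          | cons _ _ => simp
        by_cases hin : PySem.Str.isIn "$$" line = true
        · have hc1 : 1 ≤ PySem.Str.count line "$$" := by
            rw [PySem.Str.count, count_eq_gcount _ _ (by simp)]
            exact (isIn_iff_gcount_pos _ _ (by simp)).mp (by simpa [PySem.Str.isIn] using hin)
          rw [if_pos rfl, if_pos rfl, hin]
          simp only [hlen, Bool.and_true, Bool.true_and, if_true]
          rw [hcnt]
          by_cases heven : dollars' % 2 = 0
          · rw [if_pos (⟨by omega, heven⟩ : 2 ≤ dollars' ∧ dollars' % 2 = 0)]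
            rw [if_pos (show (decide (dollars' % 2 = 0)) = true by simpa using heven)]
            by_cases hsemi : PySem.Str.endswith (PySem.Str.rstrip line) ";" = true
            · rw [if_pos hsemi, if_pos hsemi]
              simp [hres']
            · rw [if_neg hsemi, if_neg hsemi, hstep]
              exact ih _ _ _ _ _ (by simp) hI'
          · rw [if_neg (show ¬ (2 ≤ dollars' ∧ dollars' % 2 = 0) by rintro ⟨_, h⟩; exact heven h)]
            rw [if_neg (show ¬ (decide (dollars' % 2 = 0)) = true by simpa using heven)]
            rw [hstep]
            exact ih _ _ _ _ _ (fun _ => ⟨by simp [hres'], by omega⟩) hI'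
        · have hc0 : PySem.Str.count line "$$" = 0 := by
            rw [PySem.Str.count, count_eq_gcount _ _ (by simp)]
            by_contra hx
            exact absurd ((isIn_iff_gcount_pos "$$".toList line.toList (by decide)).mpr
              (by omega)) (by simpa [PySem.Str.isIn] using hin)
          rw [Bool.not_eq_true] at hin
          rw [if_pos rfl, if_pos rfl, hin]
          simp only [Bool.false_and, Bool.false_eq_true, if_false]
          rw [hstep]
          exact ih _ _ _ _ _ (fun _ => ⟨by simp [hres'], by omega⟩) hI'
      · rw [Bool.not_eq_true] at hbody
        subst hbody
        simp only [Bool.false_eq_true, if_false]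
        by_cases hin : PySem.Str.isIn "$$" line = true
        · have hc1 : 1 ≤ PySem.Str.count line "$$" := by
            rw [PySem.Str.count, count_eq_gcount _ _ (by simp)]
            exact (isIn_iff_gcount_pos _ _ (by simp)).mp (by simpa [PySem.Str.isIn] using hin)
          rw [if_pos hin, if_pos hin, hstep]
          exact ih _ _ _ _ _ (fun _ => ⟨by simp [hres'], by omega⟩) hI'
        · rw [if_neg hin, if_neg hin]
          have hdep : line.toList.foldl
              (fun d ch => if ch = '(' then d + 1 else if ch = ')' then d - 1 else d) depth =
              depth + (PySem.Str.count line "(" : Int) - (PySem.Str.count line ")" : Int) := by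
            rw [paren_foldl]; simp [PySem.Str.count]
          rw [hdep]
          by_cases hend : (PySem.Str.endswith (PySem.Str.rstrip line) ";" &&
              decide (depth + (PySem.Str.count line "(" : Int) -
                (PySem.Str.count line ")" : Int) ≤ 0)) = true
          · rw [if_pos hend, if_pos hend]
            simp [hres']
          · rw [if_neg hend, if_neg hend, hstep]
            exact ih _ _ _ _ _ (by simp) hI'

-- ===== VERDICT (by name: the statement is the Claim_ definition above) =====
theorem extract_statement_py_spec : Claim_equal_extract_statement_py := by
  intro lines start_idx _ _
  unfold Spec_extract_statement_py extract_statement_py extract_statement_py_alt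
  rw [go_eq lines _ _ _ _ _ _ (by simp) dcountInv_nil]
  rfl
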